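-- pv_equiv track=rewrite | github.com/jenaalsup/secom | 1c_spc_alarm_matrix.py | alarm_7t
-- ===== SOURCE A (Python) =====
-- def alarm_7t(feature, num_same_direction=7):
--   result = [0] * len(feature)
--   curr_up = 0
--   curr_down = 0
--   for i in range(1, len(feature)):
--     if feature[i] > feature[i - 1]:
--       curr_up += 1
--       curr_down = 0
--     elif feature[i] < feature[i - 1]:
--       curr_down += 1
--       curr_up = 0
--     else:
--       curr_up = 0
--       curr_down = 0
--     if curr_up >= num_same_direction - 1 or curr_down >= num_same_direction - 1:
--       result[i] = 1
--   return result
-- ===== SOURCE B (Python) =====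
-- def alarm_7t(feature, num_same_direction=7):
--     # Run-length encode the adjacent-comparison signs; emit each maximal
--     # same-sign group's flags as one block via a closed formula.
--     signs = [(b > a) - (b < a) for a, b in zip(feature, feature[1:])]
--     t = num_same_direction - 1
--     out = [0] * min(len(feature), 1)
--     i = 0
--     while i < len(signs):
--         j = i + 1
--         while j < len(signs) and signs[j] == signs[i]:
--             j += 1
--         L = j - i
--         if signs[i] == 0:
--             out += [1 if t <= 0 else 0] * L
--         else:
--             ones = L if t <= 1 else max(L - t + 1, 0)
--             out += [0] * (L - ones) + [1] * ones
--         i = j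
--     return out
-- ===== Notes on version B (the rewrite author's own statement) =====
-- stated objective: alternative
-- what changed: B run-length-encodes the signs of adjacent differences into maximal same-sign groups and emits each group's flags as one whole block computed by a closed formula (number of flagged tail positions = clamp(L - (t-1) + 1)), instead of A's per-element loop maintaining up/down counters.
import Mathlib
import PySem

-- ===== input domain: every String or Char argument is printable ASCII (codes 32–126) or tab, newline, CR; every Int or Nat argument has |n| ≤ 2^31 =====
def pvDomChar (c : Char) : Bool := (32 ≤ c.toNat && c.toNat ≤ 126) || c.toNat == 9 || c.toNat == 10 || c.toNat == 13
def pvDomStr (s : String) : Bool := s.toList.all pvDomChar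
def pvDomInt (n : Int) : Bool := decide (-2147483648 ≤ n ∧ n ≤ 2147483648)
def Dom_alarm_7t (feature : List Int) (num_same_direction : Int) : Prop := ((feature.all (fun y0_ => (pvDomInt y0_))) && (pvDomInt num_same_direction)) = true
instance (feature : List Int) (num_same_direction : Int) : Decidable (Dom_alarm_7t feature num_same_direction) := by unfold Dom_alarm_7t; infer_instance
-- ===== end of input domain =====

-- B replaces A's per-element up/down counters by run-length encoding the signs list
-- and emitting each maximal same-sign group's flags as one block from a closed formula
-- (alternative decomposition, same cost).


-- ===== PORT A =====
def alarm_7t (feature : List Int) (num_same_direction : Int) : List Int :=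
  let st := (PySem.List.pyRange 1 (feature.length : Int) 1).foldl
    (fun (st : List Int × Int × Int) i =>
      let result := st.1
      let curr_up := st.2.1
      let curr_down := st.2.2
      let fi := PySem.List.pyGetD feature i 0
      let fp := PySem.List.pyGetD feature (i - 1) 0
      let p : Int × Int :=
        if fi > fp then (curr_up + 1, 0)
        else if fi < fp then (0, curr_down + 1)
        else (0, 0)
      let result :=
        if p.1 ≥ num_same_direction - 1 ∨ p.2 ≥ num_same_direction - 1 then
          PySem.List.pySetD result i 1
        else result
      (result, p.1, p.2))
    (List.replicate feature.length 0, 0, 0)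
  st.1

-- ===== PORT B =====
/-- The inner while-scan of Source B: a maximal same-sign group is cut off the front of the
signs list and its flags are emitted as one block computed by a closed formula. -/
def rleEmit (t : Int) : List Int → List Int
  | [] => []
  | s :: tail =>
    let m := (tail.takeWhile (· == s)).length
    let rest := tail.dropWhile (· == s)
    let L : Int := ((m + 1 : Nat) : Int)
    let block :=
      if s = 0 then List.replicate (m + 1) (if t ≤ 0 then (1 : Int) else 0)
      else
        let ones := if t ≤ 1 then L else max (L - t + 1) 0
        List.replicate (L - ones).toNat 0 ++ List.replicate ones.toNat 1
    block ++ rleEmit t rest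
termination_by ss => ss.length
decreasing_by
  simpa using Nat.lt_succ_of_le (List.length_dropWhile_le (· == s) tail)

def alarm_7t_alt (feature : List Int) (num_same_direction : Int) : List Int :=
  let signs := (feature.zip (feature.drop 1)).map
    (fun p => (if p.2 > p.1 then (1 : Int) else 0) - (if p.2 < p.1 then 1 else 0))
  let t := num_same_direction - 1
  List.replicate (min feature.length 1) 0 ++ rleEmit t signs

-- ===== PRECONDITION & SPEC =====
def Spec_alarm_7t (feature : List Int) (num_same_direction : Int) (out : List Int) : Prop := out = alarm_7t_alt feature num_same_direction
instance (feature : List Int) (num_same_direction : Int) (out : List Int) : Decidable (Spec_alarm_7t feature num_same_direction out) := by unfold Spec_alarm_7t; infer_instance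

-- ===== CLAIM (what is proved, stated in full; the proofs are below) =====
def Claim_equal_alarm_7t : Prop := ∀ (feature : List Int) (num_same_direction : Int), Dom_alarm_7t feature num_same_direction → Spec_alarm_7t feature num_same_direction (alarm_7t feature num_same_direction)

-- ===== LEMMAS AND PROOFS =====

/-- Positional reading of A's loop from position `j` on: previous value, up/down counters. -/
def goA (t : Int) : Int → Int → Int → List Int → List Int
  | _, _, _, [] => []
  | last, cu, cd, x :: xs =>
    let p : Int × Int :=
      if x > last then (cu + 1, 0) else if x < last then (0, cd + 1) else (0, 0)
    (if p.1 ≥ t ∨ p.2 ≥ t then (1 : Int) else 0) :: goA t x p.1 p.2 xs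

/-- Per-element counter semantics over the signs list (intermediate between A and B). -/
def goB (t : Int) : Int → Int → List Int → List Int
  | _, _, [] => []
  | prev, run, s :: ss =>
    let run' := if s ≠ 0 ∧ s = prev then run + 1 else if s = 0 then 0 else 1
    (if run' ≥ t then (1 : Int) else 0) :: goB t s run' ss

theorem goB_signs_eq_goA (t : Int) (xs : List Int) :
    ∀ (last cu cd prev run : Int),
      0 ≤ cu → 0 ≤ cd → run = cu + cd →
      (0 < cu → prev = 1) → (0 < cd → prev = -1) →
      goB t prev run (((last :: xs).zip xs).map
        (fun p => (if p.2 > p.1 then (1 : Int) else 0) - (if p.2 < p.1 then 1 else 0)))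
        = goA t last cu cd xs := by
  induction xs with
  | nil => intro last cu cd prev run _ _ _ _ _; simp [goA, goB]
  | cons x xs ih =>
    intro last cu cd prev run hcu hcd hrun hup hdown
    simp only [List.zip_cons_cons, List.map_cons, goA, goB]
    rcases lt_trichotomy last x with h | h | h
    · -- x > last : sign = 1
      have hs : (if x > last then (1 : Int) else 0) - (if x < last then 1 else 0) = 1 := by
        simp [h, not_lt_of_gt h]
      rw [hs]
      have hcd0 : prev = 1 → cd = 0 := by
        intro hp; by_contra hne
        have := hdown (lt_of_le_of_ne hcd (Ne.symm hne)); omega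
      have hcu0 : prev ≠ 1 → cu = 0 := by
        intro hp; by_contra hne
        exact hp (hup (lt_of_le_of_ne hcu (Ne.symm hne)))
      have hrun' : (if (1 : Int) ≠ 0 ∧ (1 : Int) = prev then run + 1 else if (1 : Int) = 0 then 0 else 1) = cu + 1 := by
        by_cases hp : prev = 1
        · have := hcd0 hp; simp [hp]; omega
        · have := hcu0 hp; simp [Ne.symm hp]; omega
      have hpA : (if x > last then (cu + 1, (0:Int)) else if x < last then ((0:Int), cd + 1) else (0, 0)) = (cu + 1, 0) := by
        simp [h]
      rw [hrun', hpA]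
      congr 1
      · show (if cu + 1 ≥ t then (1:Int) else 0) = if cu + 1 ≥ t ∨ (0:Int) ≥ t then 1 else 0
        by_cases ht : cu + 1 ≥ t <;> simp [ht]
        omega
      · exact ih x (cu + 1) 0 1 (cu + 1) (by omega) le_rfl (by omega) (fun _ => rfl) (by omega)
    · -- x = last : sign = 0
      have hs : (if x > last then (1 : Int) else 0) - (if x < last then 1 else 0) = 0 := by
        simp [h]
      rw [hs]
      have hpA : (if x > last then (cu + 1, (0:Int)) else if x < last then ((0:Int), cd + 1) else (0, 0)) = (0, 0) := by
        simp [h]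
      have hrun' : (if (0:Int) ≠ 0 ∧ (0:Int) = prev then run + 1 else if (0:Int) = 0 then 0 else 1) = 0 := by
        simp
      rw [hrun', hpA]
      congr 1
      · simp
      · exact ih x 0 0 0 0 le_rfl le_rfl (by omega) (by omega) (by omega)
    · -- x < last : sign = -1
      have hs : (if x > last then (1 : Int) else 0) - (if x < last then 1 else 0) = -1 := by
        simp [h, not_lt_of_gt h]
      rw [hs]
      have hcu0 : prev = -1 → cu = 0 := by
        intro hp; by_contra hne
        have := hup (lt_of_le_of_ne hcu (Ne.symm hne)); omega
      have hcd0 : prev ≠ -1 → cd = 0 := by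
        intro hp; by_contra hne
        exact hp (hdown (lt_of_le_of_ne hcd (Ne.symm hne)))
      have hrun' : (if (-1 : Int) ≠ 0 ∧ (-1 : Int) = prev then run + 1 else if (-1 : Int) = 0 then 0 else 1) = cd + 1 := by
        by_cases hp : prev = -1
        · have := hcu0 hp; simp [hp]; omega
        · have := hcd0 hp; simp; omega
      have hpA : (if x > last then (cu + 1, (0:Int)) else if x < last then ((0:Int), cd + 1) else (0, 0)) = (0, cd + 1) := by
        simp [h, not_lt_of_gt h]
      rw [hrun', hpA]
      congr 1
      · show (if cd + 1 ≥ t then (1:Int) else 0) = if (0:Int) ≥ t ∨ cd + 1 ≥ t then 1 else 0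
        by_cases ht : cd + 1 ≥ t <;> simp [ht]
        omega
      · exact ih x 0 (cd + 1) (-1) (cd + 1) le_rfl (by omega) (by omega) (by omega) (fun _ => rfl)

theorem foldA_eq_goA (feature : List Int) (nsd : Int) :
    ∀ (k j : Nat) (r : List Int) (cu cd : Int),
      j + k = feature.length → 1 ≤ j →
      r.length = feature.length →
      r.drop j = List.replicate (feature.length - j) 0 →
      ((PySem.List.pyRange (j : Int) (feature.length : Int) 1).foldl
        (fun (st : List Int × Int × Int) i =>
          let result := st.1
          let curr_up := st.2.1
          let curr_down := st.2.2
          let fi := PySem.List.pyGetD feature i 0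
          let fp := PySem.List.pyGetD feature (i - 1) 0
          let p : Int × Int :=
            if fi > fp then (curr_up + 1, 0)
            else if fi < fp then (0, curr_down + 1)
            else (0, 0)
          let result :=
            if p.1 ≥ nsd - 1 ∨ p.2 ≥ nsd - 1 then
              PySem.List.pySetD result i 1
            else result
          (result, p.1, p.2))
        (r, cu, cd)).1
      = r.take j ++ goA (nsd - 1) (feature.getD (j - 1) 0) cu cd (feature.drop j) := by
  intro k
  induction k with
  | zero =>
    intro j r cu cd hjk hj hr hdrop
    have hj' : j = feature.length := by omega
    rw [PySem.List.pyRange_one_eq_nil (by exact_mod_cast le_of_eq hj'.symm)]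
    simp [hj', List.take_of_length_le (le_of_eq hr), List.drop_length, goA]
  | succ k ih =>
    intro j r cu cd hjk hj hr hdrop
    have hjlt : j < feature.length := by omega
    have hjr : j < r.length := by omega
    rw [PySem.List.pyRange_one_cons (by exact_mod_cast hjlt), List.foldl_cons]
    have hfp : ((j : Int) - 1) = (((j - 1 : Nat)) : Int) := by push_cast [hj]; ring
    have hgj : feature.getD j 0 = feature[j] := List.getD_eq_getElem feature 0 hjlt
    have hrj : r[j] = 0 ∧ r.drop (j + 1) = List.replicate (feature.length - (j + 1)) 0 := by
      have h1 : r.drop j = r[j] :: r.drop (j + 1) := List.drop_eq_getElem_cons hjr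
      have h2 : List.replicate (feature.length - j) (0 : Int)
          = 0 :: List.replicate (feature.length - (j + 1)) 0 := by
        have : feature.length - j = (feature.length - (j + 1)) + 1 := by omega
        rw [this, List.replicate_succ]
      rw [h1, h2] at hdrop
      injection hdrop with ha hb
      exact ⟨ha, hb⟩
    simp only [hfp, PySem.List.pyGetD_natCast, PySem.List.pySetD_natCast, hgj]
    set pj : Int × Int :=
      (if feature[j] > feature.getD (j - 1) 0 then (cu + 1, 0)
       else if feature[j] < feature.getD (j - 1) 0 then (0, cd + 1)
       else (0, 0)) with hpj
    set r' : List Int := if pj.1 ≥ nsd - 1 ∨ pj.2 ≥ nsd - 1 then r.set j 1 else r with hr'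
    have hlen' : r'.length = feature.length := by
      rw [hr']; split <;> simp [hr]
    have hdrop' : r'.drop (j + 1) = List.replicate (feature.length - (j + 1)) 0 := by
      rw [hr']; split
      · rw [List.drop_set_of_lt (by omega : j < j + 1)]; exact hrj.2
      · exact hrj.2
    have htake : r'.take (j + 1) = r.take j ++ [if pj.1 ≥ nsd - 1 ∨ pj.2 ≥ nsd - 1 then (1 : Int) else 0] := by
      rw [hr']; split
      · rw [List.take_add_one, List.take_set_of_le le_rfl, List.getElem?_set_self hjr]
        rfl
      · rw [List.take_add_one, List.getElem?_eq_getElem hjr, hrj.1]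
        rfl
    have ihs := ih (j + 1) r' pj.1 pj.2 (by omega) (by omega) hlen' hdrop'
    rw [Nat.add_sub_cancel, hgj] at ihs
    rw [List.drop_eq_getElem_cons hjlt]
    simp only [goA]
    rw [← hpj, List.append_cons, ← htake]
    exact ihs

/-- goB over a nonzero run of length m continued from count k: per-element flags. -/
theorem goB_nz_run (t s : Int) (hs : s ≠ 0) :
    ∀ (m : Nat) (k : Int) (rest : List Int),
      goB t s k (List.replicate m s ++ rest)
        = (List.range m).map (fun (j : Nat) => if t ≤ k + (j : Int) + 1 then (1 : Int) else 0)
          ++ goB t s (k + m) rest := by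
  intro m
  induction m with
  | zero => intro k rest; simp
  | succ m ih =>
    intro k rest
    rw [List.replicate_succ, List.cons_append]
    have hstep : goB t s k (s :: (List.replicate m s ++ rest))
        = (if k + 1 ≥ t then (1 : Int) else 0) :: goB t s (k + 1) (List.replicate m s ++ rest) := by
      simp [goB, hs]
    rw [hstep, ih (k + 1) rest]
    have hmap : (List.range m).map (fun (j : Nat) => if t ≤ k + 1 + (j : Int) + 1 then (1 : Int) else 0)
        = (List.range m).map ((fun (j : Nat) => if t ≤ k + (j : Int) + 1 then (1 : Int) else 0) ∘ Nat.succ) := by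
      apply List.map_congr_left
      intro j _
      simp only [Function.comp, Nat.succ_eq_add_one]
      by_cases hc : t ≤ k + 1 + (j : Int) + 1
      · rw [if_pos hc, if_pos (by push_cast at hc ⊢; omega)]
      · rw [if_neg hc, if_neg (by push_cast at hc ⊢; omega)]
    have hhead : (if k + 1 ≥ t then (1 : Int) else 0)
        = (if t ≤ k + (((0 : Nat)) : Int) + 1 then (1 : Int) else 0) := by
      simp [ge_iff_le]
    have htailn : k + ((m + 1 : Nat) : Int) = k + 1 + (m : Int) := by push_cast; ring
    rw [List.range_succ_eq_map, List.map_cons, List.map_map, List.cons_append, ← hmap, ← hhead,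
      htailn]

/-- goB over a zero run of length m+1: each flag is `t ≤ 0`, state resets to (0,0). -/
theorem goB_z_run (t : Int) :
    ∀ (m : Nat) (p r : Int) (rest : List Int),
      goB t p r (List.replicate (m + 1) 0 ++ rest)
        = List.replicate (m + 1) (if t ≤ 0 then (1 : Int) else 0) ++ goB t 0 0 rest := by
  intro m
  induction m with
  | zero =>
    intro p r rest
    simp [goB]
  | succ m ih =>
    intro p r rest
    have hstep : goB t p r (List.replicate (m + 1 + 1) 0 ++ rest)
        = (if (0 : Int) ≥ t then (1 : Int) else 0) :: goB t 0 0 (List.replicate (m + 1) 0 ++ rest) := by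
      rw [List.replicate_succ, List.cons_append]
      simp [goB]
    rw [hstep, ih 0 0 rest]
    simp [List.replicate_succ, ge_iff_le]

/-- The per-count flag list of a run of length m+1 equals B's closed-form block. -/
theorem flags_block (t : Int) (m : Nat) :
    (List.range (m + 1)).map (fun (j : Nat) => if t ≤ (j : Int) + 1 then (1 : Int) else 0)
      = (let L : Int := ((m + 1 : Nat) : Int)
         let ones := if t ≤ 1 then L else max (L - t + 1) 0
         List.replicate (L - ones).toNat 0 ++ List.replicate ones.toNat 1) := by
  simp only []
  set L : Int := ((m + 1 : Nat) : Int) with hL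
  set ones : Int := if t ≤ 1 then L else max (L - t + 1) 0 with hones
  have hcase : (t ≤ 1 ∧ ones = L) ∨ (¬ t ≤ 1 ∧ L - t + 1 ≤ 0 ∧ ones = 0)
      ∨ (¬ t ≤ 1 ∧ 0 ≤ L - t + 1 ∧ ones = L - t + 1) := by
    rw [hones]; split_ifs with h
    · exact Or.inl ⟨h, rfl⟩
    · rcases le_total (L - t + 1) 0 with hc | hc
      · exact Or.inr (Or.inl ⟨h, hc, max_eq_right hc⟩)
      · exact Or.inr (Or.inr ⟨h, hc, max_eq_left hc⟩)
  have hLpos : L = ((m : Int) + 1) := by rw [hL]; push_cast; ring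
  apply List.ext_getElem
  · simp only [List.length_map, List.length_range, List.length_append, List.length_replicate]
    rcases hcase with ⟨h1, h2⟩ | ⟨h1, h2, h3⟩ | ⟨h1, h2, h3⟩ <;> omega
  · intro j hj1 hj2
    rw [List.getElem_map, List.getElem_range]
    have hjm : j < m + 1 := by simpa using hj1
    by_cases hsplit : j < (List.replicate (L - ones).toNat (0 : Int)).length
    · rw [List.getElem_append_left hsplit, List.getElem_replicate]
      rw [List.length_replicate] at hsplit
      have hc : ¬ t ≤ (j : Int) + 1 := by
        rcases hcase with ⟨h1, h2⟩ | ⟨h1, h2, h3⟩ | ⟨h1, h2, h3⟩ <;> omega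
      simp [hc]
    · rw [List.getElem_append_right (le_of_not_gt hsplit), List.getElem_replicate]
      rw [List.length_replicate] at hsplit
      have hc : t ≤ (j : Int) + 1 := by
        rcases hcase with ⟨h1, h2⟩ | ⟨h1, h2, h3⟩ | ⟨h1, h2, h3⟩ <;> omega
      simp [hc]

/-- Head of dropWhile fails the predicate. -/
theorem head_dropWhile_false {α : Type} (p : α → Bool) (l : List α) :
    ∀ a, (l.dropWhile p).head? = some a → p a = false := by
  induction l with
  | nil => intro a h; simp at h
  | cons x xs ih =>
    intro a h
    rw [List.dropWhile_cons] at h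
    split at h
    · exact ih a h
    · rename_i hx
      simp at h
      subst h
      simpa using hx

/-- takeWhile (· == s) is a replicate of s. -/
theorem takeWhile_beq_replicate (s : Int) (l : List Int) :
    l.takeWhile (· == s) = List.replicate (l.takeWhile (· == s)).length s := by
  apply List.eq_replicate_of_mem
  intro x hx
  have := List.mem_takeWhile_imp hx
  simpa using this

/-- Main: on any signs list entered "fresh" (head differs from prev, or head is 0),
goB equals the run-length block emission. -/
theorem goB_eq_rleEmit (t : Int) :
    ∀ (n : Nat) (ss : List Int), ss.length ≤ n →
      ∀ (p r : Int), (∀ s, ss.head? = some s → s = 0 ∨ s ≠ p) →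
      goB t p r ss = rleEmit t ss := by
  intro n
  induction n with
  | zero =>
    intro ss hlen p r _
    cases ss with
    | nil => simp [goB, rleEmit]
    | cons s tail => simp at hlen
  | succ n ih =>
    intro ss hlen p r hfresh
    cases ss with
    | nil => simp [goB, rleEmit]
    | cons s tail =>
      set m := (tail.takeWhile (· == s)).length with hm
      have htw : tail.takeWhile (· == s) = List.replicate m s := takeWhile_beq_replicate s tail
      have htail : tail = List.replicate m s ++ tail.dropWhile (· == s) := by
        conv_lhs => rw [← List.takeWhile_append_dropWhile (p := (· == s)) (l := tail)]
        rw [htw]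
      set rest := tail.dropWhile (· == s) with hrest
      have hrest_len : rest.length ≤ n := by
        have h1 : rest.length ≤ tail.length := List.length_dropWhile_le _ _
        simp at hlen; omega
      have hrest_head : ∀ s', rest.head? = some s' → s' ≠ s := by
        intro s' h
        have := head_dropWhile_false (· == s) tail s' h
        simpa using this
      have hrle : rleEmit t (s :: tail)
          = (if s = 0 then List.replicate (m + 1) (if t ≤ 0 then (1 : Int) else 0)
             else
               let L : Int := ((m + 1 : Nat) : Int)
               let ones := if t ≤ 1 then L else max (L - t + 1) 0
               List.replicate (L - ones).toNat 0 ++ List.replicate ones.toNat 1)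
            ++ rleEmit t rest := by
        rw [rleEmit]
      by_cases hs : s = 0
      · subst hs
        rw [hrle]
        have hss : (0 : Int) :: tail = List.replicate (m + 1) 0 ++ rest := by
          rw [List.replicate_succ, List.cons_append, ← htail]
        rw [hss, goB_z_run t m p r rest]
        simp only []
        congr 1
        exact ih rest hrest_len 0 0 (fun s' h => Or.inr (hrest_head s' h))
      · rw [hrle, if_neg hs]
        have hsp : s ≠ p := by
          rcases hfresh s rfl with h | h
          · exact absurd h hs
          · exact h
        conv_lhs => rw [htail]
        have hstep : goB t p r (s :: (List.replicate m s ++ rest))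
            = (if (1 : Int) ≥ t then (1 : Int) else 0)
              :: goB t s 1 (List.replicate m s ++ rest) := by
          simp [goB, hs, hsp]
        rw [hstep, goB_nz_run t s hs m 1 rest]
        have hcons : (if (1 : Int) ≥ t then (1 : Int) else 0)
              :: ((List.range m).map (fun (j : Nat) => if t ≤ 1 + (j : Int) + 1 then (1 : Int) else 0)
                  ++ goB t s (1 + m) rest)
            = ((List.range (m + 1)).map (fun (j : Nat) => if t ≤ (j : Int) + 1 then (1 : Int) else 0))
              ++ goB t s (1 + m) rest := by
          have hmap : (List.range m).map (fun (j : Nat) => if t ≤ 1 + (j : Int) + 1 then (1 : Int) else 0)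
              = (List.range m).map ((fun (j : Nat) => if t ≤ (j : Int) + 1 then (1 : Int) else 0) ∘ Nat.succ) := by
            apply List.map_congr_left
            intro j _
            simp only [Function.comp, Nat.succ_eq_add_one]
            by_cases hc : t ≤ 1 + (j : Int) + 1
            · rw [if_pos hc, if_pos (by push_cast at hc ⊢; omega)]
            · rw [if_neg hc, if_neg (by push_cast at hc ⊢; omega)]
          have hhead : (if (1 : Int) ≥ t then (1 : Int) else 0)
              = (if t ≤ (((0 : Nat)) : Int) + 1 then (1 : Int) else 0) := by
            simp [ge_iff_le]
          rw [List.range_succ_eq_map, List.map_cons, List.map_map, List.cons_append, ← hmap,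
            ← hhead]
        rw [hcons, flags_block t m]
        congr 1
        exact ih rest hrest_len s (1 + m)
          (fun s' h => by
            by_cases h0 : s' = 0
            · exact Or.inl h0
            · exact Or.inr (hrest_head s' h))

-- ===== VERDICT (by name: the statement is the Claim_ definition above) =====
theorem alarm_7t_spec : Claim_equal_alarm_7t := by
  unfold Claim_equal_alarm_7t
  intro feature nsd _
  unfold Spec_alarm_7t
  cases feature with
  | nil =>
    simp [alarm_7t, alarm_7t_alt, rleEmit]
  | cons f0 rest =>
    have hA : alarm_7t (f0 :: rest) nsd
        = (List.replicate (f0 :: rest).length (0 : Int)).take 1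
          ++ goA (nsd - 1) ((f0 :: rest).getD 0 0) 0 0 ((f0 :: rest).drop 1) :=
      foldA_eq_goA (f0 :: rest) nsd rest.length 1 (List.replicate (f0 :: rest).length 0) 0 0
        (by simp only [List.length_cons]; omega) le_rfl (by simp) (by simp)
    set signs := (((f0 :: rest)).zip rest).map
      (fun p => (if p.2 > p.1 then (1 : Int) else 0) - (if p.2 < p.1 then 1 else 0)) with hsigns
    have hB : alarm_7t_alt (f0 :: rest) nsd
        = List.replicate (min (f0 :: rest).length 1) 0 ++ rleEmit (nsd - 1) signs := by
      simp [alarm_7t_alt, hsigns]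
    have hgoB : goB (nsd - 1) 0 0 signs = rleEmit (nsd - 1) signs :=
      goB_eq_rleEmit (nsd - 1) signs.length signs le_rfl 0 0
        (fun s _ => eq_or_ne s 0)
    rw [hA, hB, ← hgoB, hsigns,
      goB_signs_eq_goA (nsd - 1) rest f0 0 0 0 0 le_rfl le_rfl (by ring) (by omega) (by omega)]
    simp [List.replicate_succ]
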